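-- pv_equiv track=rewrite | github.com/edesarrollo2021/OSITECH | base_mexico/pyfiscal/utils.py | remove_signos_c
-- ===== SOURCE A (Python) =====
-- def remove_signos_c(name):
--     "Remove article."
--     signos = (
--         '.', '. ', ', ',',',':',';','/','*','+','-',
--     )
--     sig = name.split()
--     for item in signos:
--         for i in sig:
--             if item in i:
--                 name = name.replace(item, 'X')
--             else:
--                 name = name
--     data=name
--     return data
-- ===== SOURCE B (Python) =====
-- def remove_signos_c(name):
--     "Remove article."
--     return name.translate(str.maketrans('.,:;/*+-', 'XXXXXXXX'))
-- ===== Notes on version B (the rewrite author's own statement) =====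
-- stated objective: idiomatic
-- what changed: Replaced the nested sign-by-word scan with repeated whole-string replaces by a single translation table applied in one pass; the space-containing signs ('. ', ', ') are omitted because A's word-level membership test can never match them.
import Mathlib
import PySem

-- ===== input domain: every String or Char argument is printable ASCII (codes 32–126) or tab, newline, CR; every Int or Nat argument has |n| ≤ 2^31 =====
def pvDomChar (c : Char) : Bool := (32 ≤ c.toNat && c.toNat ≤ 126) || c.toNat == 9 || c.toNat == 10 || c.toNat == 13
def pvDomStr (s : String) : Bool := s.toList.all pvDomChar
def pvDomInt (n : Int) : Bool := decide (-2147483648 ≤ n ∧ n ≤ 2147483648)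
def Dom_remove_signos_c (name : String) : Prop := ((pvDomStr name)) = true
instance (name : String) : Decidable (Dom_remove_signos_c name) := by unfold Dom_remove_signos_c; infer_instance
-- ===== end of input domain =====

-- B replaces A's nested sign-by-word loops and repeated whole-string replaces with one
-- character-translation pass (idiomatic); same return value on every input.

-- ===== PORT A =====
def remove_signos_c (name : String) : String :=
  let signos : List String := [".", ". ", ", ", ",", ":", ";", "/", "*", "+", "-"]
  let sig := PySem.Str.split₀ name
  let name := signos.foldl (fun name item =>
      sig.foldl (fun name i =>
        if PySem.Str.isIn item i then PySem.Str.replace name item "X" else name) name) name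
  let data := name
  data

-- ===== PORT B =====
-- port of Source B's str.translate with the table maketrans('.,:;/*+-', 'XXXXXXXX'):
-- one pass mapping each listed character to 'X'
def remove_signos_c_alt (name : String) : String :=
  String.ofList (name.toList.map (fun c =>
    if c ∈ ['.', ',', ':', ';', '/', '*', '+', '-'] then 'X' else c))

-- ===== PRECONDITION & SPEC =====
def Spec_remove_signos_c (name : String) (out : String) : Prop := out = remove_signos_c_alt name
instance (name : String) (out : String) : Decidable (Spec_remove_signos_c name out) := by unfold Spec_remove_signos_c; infer_instance

-- ===== CLAIM (what is proved, stated in full; the proofs are below) =====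
def Claim_equal_remove_signos_c : Prop := ∀ (name : String), Dom_remove_signos_c name → Spec_remove_signos_c name (remove_signos_c name)

-- ===== LEMMAS AND PROOFS =====

-- one single-character substitution as a map
def pvSub (c : Char) (l : List Char) : List Char :=
  l.map (fun d => if d = c then 'X' else d)

-- replace with a single-character pattern is exactly pvSub
theorem pvReplace_go_singleton (c : Char) (l : List Char) :
    ∀ (fuel : Nat) (acc : List Char), l.length ≤ fuel →
      PySem.Chars.replace.go [c] ['X'] fuel l acc = acc.reverse ++ pvSub c l := by
  induction l with
  | nil =>
      intro fuel acc _
      cases fuel <;> simp [PySem.Chars.replace.go, pvSub]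
  | cons d t ih =>
      intro fuel acc h
      cases fuel with
      | zero => simp at h
      | succ f =>
        by_cases hdc : c = d
        · subst hdc
          simp only [PySem.Chars.replace.go, List.isPrefixOf, BEq.rfl, Bool.true_and,
            if_true, List.length_cons] at *
          have hd : List.drop (([] : List Char).length + 1) (c :: t) = t := by simp
          rw [hd, ih f _ (by omega)]
          simp [pvSub]
        · have : ([c].isPrefixOf (d :: t)) = false := by
            simp [List.isPrefixOf]; exact fun h' => (hdc h').elim
          simp only [PySem.Chars.replace.go, this, Bool.false_eq_true, if_false]
          rw [ih f (d :: acc) (by simpa using Nat.le_of_succ_le_succ h)]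
          simp [pvSub, Ne.symm hdc]

theorem pvReplace_singleton (c : Char) (l : List Char) :
    PySem.Chars.replace l [c] ['X'] = pvSub c l := by
  simpa using pvReplace_go_singleton c l l.length [] le_rfl

-- single-character membership test
theorem pvIsIn_singleton (c : Char) (l : List Char) :
    PySem.Chars.isIn [c] l = true ↔ c ∈ l := by
  rw [PySem.Chars.isIn_iff_infix]
  constructor
  · rintro ⟨p, s, rfl⟩; simp
  · intro h
    obtain ⟨p, s, rfl⟩ := List.append_of_mem h
    exact ⟨p, s, by simp⟩

-- accumulated words survive into split₀.go's result
theorem pvSplitGo_acc_mem (s cur : List Char) (acc : List (List Char)) (w : List Char) (hw : w ∈ acc) :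
    w ∈ PySem.Chars.split₀.go s cur acc := by
  induction s generalizing cur acc with
  | nil =>
      by_cases h : cur.isEmpty
      · simp [PySem.Chars.split₀.go, h, hw]
      · simp only [PySem.Chars.split₀.go, h, Bool.false_eq_true, if_false,
          List.mem_reverse, List.mem_cons]
        exact Or.inr (by simpa using hw)
  | cons d t ih =>
      by_cases hd : PySem.Chars.isspace d
      · by_cases hc : cur.isEmpty <;>
          simp only [PySem.Chars.split₀.go, hd, hc, if_true] <;>
          [exact ih _ _ hw; exact ih _ _ (List.mem_cons_of_mem _ hw)]
      · simp only [PySem.Chars.split₀.go, hd, Bool.false_eq_true, if_false]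
        exact ih _ _ hw

-- every non-space character of the input (or of the current word) ends up in some word
theorem pvSplitGo_covers (c : Char) (hc : PySem.Chars.isspace c = false) :
    ∀ (s cur : List Char) (acc : List (List Char)), (c ∈ s ∨ c ∈ cur) →
      ∃ w ∈ PySem.Chars.split₀.go s cur acc, c ∈ w := by
  intro s
  induction s with
  | nil =>
      intro cur acc h
      rcases h with h | h
      · simp at h
      · have hne : cur.isEmpty = false := by
          cases cur
          · simp at h
          · simp
        refine ⟨cur.reverse, ?_, by simpa using h⟩
        simp [PySem.Chars.split₀.go, hne]
  | cons d t ih =>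
      intro cur acc h
      by_cases hd : PySem.Chars.isspace d
      · have hcd : c ≠ d := fun h' => by rw [h'] at hc; rw [hd] at hc; simp at hc
        have h' : c ∈ t ∨ c ∈ cur := by
          rcases h with h | h
          · rcases List.mem_cons.mp h with h | h
            · exact absurd h hcd
            · exact Or.inl h
          · exact Or.inr h
        by_cases hcur : cur.isEmpty
        · have : c ∈ t := by
            rcases h' with h' | h'
            · exact h'
            · rw [List.isEmpty_iff.mp hcur] at h'; simp at h'
          simp only [PySem.Chars.split₀.go, hd, hcur, if_true]
          exact ih _ _ (Or.inl this)
        · simp only [PySem.Chars.split₀.go, hd, hcur, if_true, Bool.false_eq_true, if_false]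
          rcases h' with h' | h'
          · exact ih _ _ (Or.inl h')
          · exact ⟨cur.reverse, pvSplitGo_acc_mem _ _ _ _ (List.mem_cons_self),
              by simpa using h'⟩
      · simp only [PySem.Chars.split₀.go, hd, Bool.false_eq_true, if_false]
        apply ih
        rcases h with h | h
        · rcases List.mem_cons.mp h with h | h
          · exact Or.inr (h ▸ List.mem_cons_self)
          · exact Or.inl h
        · exact Or.inr (List.mem_cons_of_mem _ h)

-- words produced by split₀.go contain no whitespace
theorem pvSplitGo_no_space :
    ∀ (s cur : List Char) (acc : List (List Char)), (∀ d ∈ cur, PySem.Chars.isspace d = false) →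
      (∀ w ∈ acc, ∀ d ∈ w, PySem.Chars.isspace d = false) →
      ∀ w ∈ PySem.Chars.split₀.go s cur acc, ∀ d ∈ w, PySem.Chars.isspace d = false := by
  intro s
  induction s with
  | nil =>
      intro cur acc hcur hacc w hw
      by_cases h : cur.isEmpty
      · simp only [PySem.Chars.split₀.go, h, if_true, List.mem_reverse] at hw
        exact hacc w hw
      · simp only [PySem.Chars.split₀.go, h, Bool.false_eq_true, if_false,
          List.mem_reverse, List.mem_cons] at hw
        rcases hw with h' | h'
        · intro d hd
          exact hcur d (by rw [h'] at hd; simpa using hd)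
        · exact hacc w h'
  | cons e t ih =>
      intro cur acc hcur hacc w hw
      by_cases hd : PySem.Chars.isspace e
      · by_cases hc : cur.isEmpty <;>
          simp only [PySem.Chars.split₀.go, hd, hc, if_true, Bool.false_eq_true, if_false] at hw
        · exact ih _ _ (by simp) hacc w hw
        · refine ih _ _ (by simp) ?_ w hw
          intro w' hw' d hd'
          rcases List.mem_cons.mp hw' with h' | h'
          · exact hcur d (by rw [h'] at hd'; simpa using hd')
          · exact hacc w' h' d hd'
      · simp only [PySem.Chars.split₀.go, hd, Bool.false_eq_true, if_false] at hw
        refine ih _ _ ?_ hacc w hw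
        intro d hd'
        rcases List.mem_cons.mp hd' with h' | h'
        · rw [h']; simpa using hd
        · exact hcur d h'

-- the inner word loop for a one-character sign collapses to pvSub
theorem pvInner_fold (c : Char) (hcX : c ≠ 'X') (ws : List (List Char)) (n : List Char)
    (H : c ∈ n → ∃ w ∈ ws, c ∈ w) :
    ws.foldl (fun n w => if PySem.Chars.isIn [c] w then PySem.Chars.replace n [c] ['X'] else n) n
      = pvSub c n := by
  induction ws generalizing n with
  | nil =>
      have : c ∉ n := fun h => by simpa using H h
      simp only [List.foldl_nil, pvSub]
      conv_lhs => rw [← List.map_id n]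
      exact List.map_congr_left fun d hd => by
        have : d ≠ c := fun h' => this (h' ▸ hd)
        simp [this]
  | cons w ws ih =>
      simp only [List.foldl_cons]
      by_cases hw : PySem.Chars.isIn [c] w
      · rw [hw, if_pos rfl, pvReplace_singleton]
        rw [ih (pvSub c n) (fun h => by
          simp only [pvSub, List.mem_map] at h
          obtain ⟨d, _, hd⟩ := h
          rcases Decidable.em (d = c) with hdc | hdc
          · rw [if_pos hdc] at hd; exact absurd hd.symm hcX
          · rw [if_neg hdc] at hd; exact absurd hd hdc)]
        simp only [pvSub, List.map_map]
        exact List.map_congr_left fun d _ => by by_cases h : d = c <;> simp [h]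
      · rw [if_neg (by simpa using hw)]
        refine ih n fun h => ?_
        obtain ⟨w', hw', hcw'⟩ := H h
        rcases List.mem_cons.mp hw' with h' | h'
        · exact absurd ((pvIsIn_singleton c w).mpr (h' ▸ hcw')) (by simpa using hw)
        · exact ⟨w', h', hcw'⟩

-- a two-character sign containing a space never matches a word of split₀
theorem pvInner_fold_space (item : List Char) (sp : Char)
    (hsp : PySem.Chars.isspace sp = true) (hmem : sp ∈ item) (name : List Char)
    (ws : List (List Char)) (hws : ∀ w ∈ ws, w ∈ PySem.Chars.split₀ name) (n : List Char) :
    ws.foldl (fun n w => if PySem.Chars.isIn item w then PySem.Chars.replace n item ['X'] else n) n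
      = n := by
  have hno : ∀ w ∈ PySem.Chars.split₀ name, PySem.Chars.isIn item w = false := by
    intro w hw
    rw [PySem.Chars.isIn_eq_false_iff]
    intro hinf
    have : sp ∈ w := hinf.subset hmem
    have := pvSplitGo_no_space name [] [] (by simp) (by simp) w hw sp this
    rw [hsp] at this; simp at this
  induction ws generalizing n with
  | nil => simp
  | cons w ws ih =>
      simp only [List.foldl_cons, hno w (hws w List.mem_cons_self), Bool.false_eq_true, if_false]
      exact ih (fun w' hw' => hws w' (List.mem_cons_of_mem _ hw')) n

-- characters produced by pvSub are 'X' or characters of the argument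
theorem pvSub_subset (c : Char) (l : List Char) :
    ∀ d ∈ pvSub c l, d = 'X' ∨ d ∈ l := by
  intro d hd
  simp only [pvSub, List.mem_map] at hd
  obtain ⟨e, he, hde⟩ := hd
  rcases Decidable.em (e = c) with h | h
  · rw [if_pos h] at hde; exact Or.inl hde.symm
  · rw [if_neg h] at hde; exact Or.inr (hde ▸ he)

-- the string-level inner loop computes the list-level inner loop
theorem pvStrInner (item : String) (ws : List (List Char)) (n : String) :
    ((ws.map String.ofList).foldl
        (fun n i => if PySem.Str.isIn item i then PySem.Str.replace n item "X" else n) n).toList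
      = ws.foldl (fun n w =>
          if PySem.Chars.isIn item.toList w then PySem.Chars.replace n item.toList ['X'] else n)
          n.toList := by
  induction ws generalizing n with
  | nil => simp
  | cons w ws ih =>
      simp only [List.map_cons, List.foldl_cons]
      have hcond : PySem.Str.isIn item (String.ofList w) = PySem.Chars.isIn item.toList w := by
        simp [PySem.Str.isIn, String.toList_ofList]
      rw [hcond]
      by_cases h : PySem.Chars.isIn item.toList w
      · rw [if_pos h, if_pos h, ih]
        have : (PySem.Str.replace n item "X").toList
            = PySem.Chars.replace n.toList item.toList ['X'] := by simp
        rw [this]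
      · rw [if_neg (by simpa using h), if_neg (by simpa using h), ih]

-- one single-character stage of A's outer loop, at string level
theorem pvStrStage (item : String) (c : Char) (hitem : item.toList = [c])
    (hc : PySem.Chars.isspace c = false) (hcX : c ≠ 'X') (name n : String)
    (hsub : ∀ d ∈ n.toList, d = 'X' ∨ d ∈ name.toList) :
    ((PySem.Str.split₀ name).foldl
        (fun n i => if PySem.Str.isIn item i then PySem.Str.replace n item "X" else n) n).toList
      = pvSub c n.toList := by
  have hdef : PySem.Str.split₀ name = (PySem.Chars.split₀ name.toList).map String.ofList := rfl
  rw [hdef, pvStrInner, hitem]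
  apply pvInner_fold c hcX
  intro h
  rcases hsub c h with h' | h'
  · exact absurd h' hcX
  · exact pvSplitGo_covers c hc name.toList [] [] (Or.inl h')

-- one space-containing stage of A's outer loop is the identity
theorem pvStrStageSpace (item : String) (sp : Char) (hsp : PySem.Chars.isspace sp = true)
    (hmem : sp ∈ item.toList) (name n : String) :
    ((PySem.Str.split₀ name).foldl
        (fun n i => if PySem.Str.isIn item i then PySem.Str.replace n item "X" else n) n).toList
      = n.toList := by
  have hdef : PySem.Str.split₀ name = (PySem.Chars.split₀ name.toList).map String.ofList := rfl
  rw [hdef, pvStrInner]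
  exact pvInner_fold_space item.toList sp hsp hmem name.toList _ (fun w hw => hw) n.toList

-- the eight substitutions compose to B's single translation pass
theorem pvSub_cons (c x : Char) (xs : List Char) :
    pvSub c (x :: xs) = (if x = c then 'X' else x) :: pvSub c xs := rfl

theorem pvCompose (l : List Char) :
    pvSub '-' (pvSub '+' (pvSub '*' (pvSub '/' (pvSub ';' (pvSub ':' (pvSub ',' (pvSub '.' l)))))))
      = l.map (fun c => if c ∈ ['.', ',', ':', ';', '/', '*', '+', '-'] then 'X' else c) := by
  induction l with
  | nil => rfl
  | cons d t ih =>
      simp only [pvSub_cons, List.map_cons]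
      rw [ih]
      refine congrArg₂ List.cons ?_ rfl
      by_cases h : d ∈ ['.', ',', ':', ';', '/', '*', '+', '-']
      · rw [if_pos h]
        simp only [List.mem_cons, List.not_mem_nil, or_false] at h
        rcases h with rfl | rfl | rfl | rfl | rfl | rfl | rfl | rfl <;> rfl
      · rw [if_neg h]
        simp only [List.mem_cons, List.not_mem_nil, or_false, not_or] at h
        obtain ⟨h1, h2, h3, h4, h5, h6, h7, h8⟩ := h
        rw [if_neg h1, if_neg h2, if_neg h3, if_neg h4, if_neg h5, if_neg h6, if_neg h7, if_neg h8]

-- subset facts propagate through pvSub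
theorem pvSub_subset_trans (c : Char) (l m : List Char)
    (h : ∀ d ∈ l, d = 'X' ∨ d ∈ m) : ∀ d ∈ pvSub c l, d = 'X' ∨ d ∈ m :=
  fun d hd => (pvSub_subset c l d hd).elim Or.inl fun h' => h d h'

-- ===== VERDICT (by name: the statement is the Claim_ definition above) =====
theorem remove_signos_c_spec : Claim_equal_remove_signos_c := by
  intro name _
  unfold Spec_remove_signos_c remove_signos_c remove_signos_c_alt
  have hbase : ∀ d ∈ name.toList, d = 'X' ∨ d ∈ name.toList := fun d h => Or.inr h
  have ea : (PySem.Str.split₀ name).foldl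
      (fun n i => if PySem.Str.isIn "." i then PySem.Str.replace n "." "X" else n)
      (name) = String.ofList (pvSub '.' name.toList) := by
    apply String.toList_inj.mp
    rw [pvStrStage "." '.' (by decide) (by decide) (by decide) name _ (hbase)]
    simp [String.toList_ofList]
  have esp0 : (PySem.Str.split₀ name).foldl
      (fun n i => if PySem.Str.isIn ". " i then PySem.Str.replace n ". " "X" else n)
      (String.ofList (pvSub '.' name.toList)) = String.ofList (pvSub '.' name.toList) := by
    apply String.toList_inj.mp
    rw [pvStrStageSpace ". " ' ' (by decide) (by decide)]
  have esp1 : (PySem.Str.split₀ name).foldl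
      (fun n i => if PySem.Str.isIn ", " i then PySem.Str.replace n ", " "X" else n)
      (String.ofList (pvSub '.' name.toList)) = String.ofList (pvSub '.' name.toList) := by
    apply String.toList_inj.mp
    rw [pvStrStageSpace ", " ' ' (by decide) (by decide)]
  have eb : (PySem.Str.split₀ name).foldl
      (fun n i => if PySem.Str.isIn "," i then PySem.Str.replace n "," "X" else n)
      (String.ofList (pvSub '.' name.toList)) = String.ofList (pvSub ',' (pvSub '.' name.toList)) := by
    apply String.toList_inj.mp
    rw [pvStrStage "," ',' (by decide) (by decide) (by decide) name _ (by simp only [String.toList_ofList]; exact pvSub_subset_trans '.' _ _ (hbase))]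
    simp [String.toList_ofList]
  have ec : (PySem.Str.split₀ name).foldl
      (fun n i => if PySem.Str.isIn ":" i then PySem.Str.replace n ":" "X" else n)
      (String.ofList (pvSub ',' (pvSub '.' name.toList))) = String.ofList (pvSub ':' (pvSub ',' (pvSub '.' name.toList))) := by
    apply String.toList_inj.mp
    rw [pvStrStage ":" ':' (by decide) (by decide) (by decide) name _ (by simp only [String.toList_ofList]; exact pvSub_subset_trans ',' _ _ (pvSub_subset_trans '.' _ _ (hbase)))]
    simp [String.toList_ofList]
  have ed : (PySem.Str.split₀ name).foldl
      (fun n i => if PySem.Str.isIn ";" i then PySem.Str.replace n ";" "X" else n)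
      (String.ofList (pvSub ':' (pvSub ',' (pvSub '.' name.toList)))) = String.ofList (pvSub ';' (pvSub ':' (pvSub ',' (pvSub '.' name.toList)))) := by
    apply String.toList_inj.mp
    rw [pvStrStage ";" ';' (by decide) (by decide) (by decide) name _ (by simp only [String.toList_ofList]; exact pvSub_subset_trans ':' _ _ (pvSub_subset_trans ',' _ _ (pvSub_subset_trans '.' _ _ (hbase))))]
    simp [String.toList_ofList]
  have ee : (PySem.Str.split₀ name).foldl
      (fun n i => if PySem.Str.isIn "/" i then PySem.Str.replace n "/" "X" else n)
      (String.ofList (pvSub ';' (pvSub ':' (pvSub ',' (pvSub '.' name.toList))))) = String.ofList (pvSub '/' (pvSub ';' (pvSub ':' (pvSub ',' (pvSub '.' name.toList))))) := by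
    apply String.toList_inj.mp
    rw [pvStrStage "/" '/' (by decide) (by decide) (by decide) name _ (by simp only [String.toList_ofList]; exact pvSub_subset_trans ';' _ _ (pvSub_subset_trans ':' _ _ (pvSub_subset_trans ',' _ _ (pvSub_subset_trans '.' _ _ (hbase)))))]
    simp [String.toList_ofList]
  have ef : (PySem.Str.split₀ name).foldl
      (fun n i => if PySem.Str.isIn "*" i then PySem.Str.replace n "*" "X" else n)
      (String.ofList (pvSub '/' (pvSub ';' (pvSub ':' (pvSub ',' (pvSub '.' name.toList)))))) = String.ofList (pvSub '*' (pvSub '/' (pvSub ';' (pvSub ':' (pvSub ',' (pvSub '.' name.toList)))))) := by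
    apply String.toList_inj.mp
    rw [pvStrStage "*" '*' (by decide) (by decide) (by decide) name _ (by simp only [String.toList_ofList]; exact pvSub_subset_trans '/' _ _ (pvSub_subset_trans ';' _ _ (pvSub_subset_trans ':' _ _ (pvSub_subset_trans ',' _ _ (pvSub_subset_trans '.' _ _ (hbase))))))]
    simp [String.toList_ofList]
  have eg : (PySem.Str.split₀ name).foldl
      (fun n i => if PySem.Str.isIn "+" i then PySem.Str.replace n "+" "X" else n)
      (String.ofList (pvSub '*' (pvSub '/' (pvSub ';' (pvSub ':' (pvSub ',' (pvSub '.' name.toList))))))) = String.ofList (pvSub '+' (pvSub '*' (pvSub '/' (pvSub ';' (pvSub ':' (pvSub ',' (pvSub '.' name.toList))))))) := by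
    apply String.toList_inj.mp
    rw [pvStrStage "+" '+' (by decide) (by decide) (by decide) name _ (by simp only [String.toList_ofList]; exact pvSub_subset_trans '*' _ _ (pvSub_subset_trans '/' _ _ (pvSub_subset_trans ';' _ _ (pvSub_subset_trans ':' _ _ (pvSub_subset_trans ',' _ _ (pvSub_subset_trans '.' _ _ (hbase)))))))]
    simp [String.toList_ofList]
  have eh : (PySem.Str.split₀ name).foldl
      (fun n i => if PySem.Str.isIn "-" i then PySem.Str.replace n "-" "X" else n)
      (String.ofList (pvSub '+' (pvSub '*' (pvSub '/' (pvSub ';' (pvSub ':' (pvSub ',' (pvSub '.' name.toList)))))))) = String.ofList (pvSub '-' (pvSub '+' (pvSub '*' (pvSub '/' (pvSub ';' (pvSub ':' (pvSub ',' (pvSub '.' name.toList)))))))) := by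
    apply String.toList_inj.mp
    rw [pvStrStage "-" '-' (by decide) (by decide) (by decide) name _ (by simp only [String.toList_ofList]; exact pvSub_subset_trans '+' _ _ (pvSub_subset_trans '*' _ _ (pvSub_subset_trans '/' _ _ (pvSub_subset_trans ';' _ _ (pvSub_subset_trans ':' _ _ (pvSub_subset_trans ',' _ _ (pvSub_subset_trans '.' _ _ (hbase))))))))]
    simp [String.toList_ofList]
  simp only [List.foldl_cons, List.foldl_nil]
  rw [ea, esp0, esp1, eb, ec, ed, ee, ef, eg, eh]
  rw [pvCompose]
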